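-- pv_equiv track=rewrite | github.com/eetuahon/aoc20 | d13.py | new_times
-- ===== SOURCE A (Python) =====
-- def new_times(times):
--     f = times[0]
--     n_times = []
--     for i in times[1:]:
--         pair = []
--         c = 0 - f[1]
--         while len(pair) < 2:
--             c += f[0]
--             if (c + i[1]) % i[0] == 0:
--                 pair.append(c)
--         n_times.append((pair[1] - pair[0], pair[0]))
--     return n_times
-- ===== SOURCE B (Python) =====
-- # B: solves each bus congruence in closed form via extended Euclid instead of
-- # scanning candidate times; first hit and period come from modular arithmetic.
--
-- def _egcd(a, b):
--     """Return (g, x) with g = gcd(a, b) >= 0 and a*x == g (mod b)."""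
--     old_r, r = a, b
--     old_s, s = 1, 0
--     while r != 0:
--         q = old_r // r
--         old_r, r = r, old_r - q * r
--         old_s, s = s, old_s - q * s
--     if old_r < 0:
--         old_r, old_s = -old_r, -old_s
--     return old_r, old_s
--
--
-- def new_times(times):
--     f0, f1 = times[0]
--     out = []
--     for p0, p1 in times[1:]:
--         m = p0 if p0 > 0 else -p0
--         g, x = _egcd(f0, m)
--         per = m // g
--         k0 = ((x * ((f1 - p1) // g) - 1) % per) + 1
--         out.append((per * f0, k0 * f0 - f1))
--     return out
-- ===== Notes on version B (the rewrite author's own statement) =====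
-- stated objective: alternative
-- what changed: Replaces A's unbounded scan for the first two matching times of each bus with extended-Euclid modular arithmetic that yields the first solution and the period in closed form.
import Mathlib
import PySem

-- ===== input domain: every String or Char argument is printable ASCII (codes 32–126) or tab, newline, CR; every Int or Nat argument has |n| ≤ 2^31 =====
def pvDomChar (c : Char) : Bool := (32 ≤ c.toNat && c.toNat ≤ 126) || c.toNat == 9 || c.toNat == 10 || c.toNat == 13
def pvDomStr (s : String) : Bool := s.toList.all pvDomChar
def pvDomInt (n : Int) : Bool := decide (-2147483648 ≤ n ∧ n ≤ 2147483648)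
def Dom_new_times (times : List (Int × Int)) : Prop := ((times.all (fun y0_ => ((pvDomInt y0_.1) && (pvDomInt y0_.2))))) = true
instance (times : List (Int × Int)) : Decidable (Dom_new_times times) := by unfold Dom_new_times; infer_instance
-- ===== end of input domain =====

-- B changes the algorithm (closed-form congruence solving vs scanning); equivalence proved on Pre_ below.

-- ===== PORT A =====
-- the 'while len(pair) < 2' loop; fuel only makes it total (it is never exhausted
-- on inputs satisfying Pre_, where the loop provably stops within the fuel)
def loopA (f0 i0 i1 : Int) : Nat → Int → List Int → List Int
  | 0, _, pair => pair
  | fuel+1, c, pair =>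
    if pair.length < 2 then
      if PySem.Int.mod ((c + f0) + i1) i0 = 0 then
        loopA f0 i0 i1 fuel (c + f0) (pair ++ [(c + f0)])
      else
        loopA f0 i0 i1 fuel (c + f0) pair
    else pair

-- one iteration of A's 'for i in times[1:]' body (fuel 2*|i0|+2 suffices under Pre_)
def aElem (f0 f1 i0 i1 : Int) : Int × Int :=
  match loopA f0 i0 i1 (2 * i0.natAbs + 2) (0 - f1) [] with
  | [p0, p1] => (p1 - p0, p0)
  | _ => (0, 0)   -- pair[1]/pair[0] would raise in Python; unreachable under Pre_

def new_times (times : List (Int × Int)) : List (Int × Int) :=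
  match times with
  | [] => []      -- times[0] raises IndexError in Python; excluded by Pre_
  | f :: rest => rest.foldl (fun n_times i => n_times ++ [aElem f.1 f.2 i.1 i.2]) []

-- ===== PORT B =====
-- transliteration of Source B's _egcd: returns (g, x), g = gcd(a,b) ≥ 0, a*x ≡ g (mod b)
def egcdLoop (oldr r olds s : Int) : Int × Int :=
  if _h : r = 0 then
    (if oldr < 0 then (-oldr, -olds) else (oldr, olds))
  else
    egcdLoop r (oldr - PySem.Int.floordiv oldr r * r) s (olds - PySem.Int.floordiv oldr r * s)
termination_by r.natAbs
decreasing_by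
  have h1 : oldr - PySem.Int.floordiv oldr r * r = PySem.Int.mod oldr r := by
    have := PySem.Int.floordiv_mul_add_mod oldr r
    omega
  rw [h1]
  rcases lt_or_gt_of_ne _h with hneg | hpos
  · have := PySem.Int.mod_neg_bounds oldr hneg
    omega
  · have h2 := PySem.Int.mod_nonneg oldr hpos
    have h3 := PySem.Int.mod_lt oldr hpos
    omega

def egcd (a b : Int) : Int × Int := egcdLoop a b 1 0

def bElem (f0 f1 i0 i1 : Int) : Int × Int :=
  let m : Int := if i0 > 0 then i0 else -i0
  let gx := egcd f0 m
  let per := PySem.Int.floordiv m gx.1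
  let k0 := PySem.Int.mod (gx.2 * PySem.Int.floordiv (f1 - i1) gx.1 - 1) per + 1
  (per * f0, k0 * f0 - f1)

def new_times_alt (times : List (Int × Int)) : List (Int × Int) :=
  match times with
  | [] => []
  | f :: rest => rest.foldl (fun out i => out ++ [bElem f.1 f.2 i.1 i.2]) []

-- ===== PRECONDITION & SPEC =====
-- Pre_ excludes exactly the inputs where Python A does not return: the empty list
-- (times[0] raises IndexError), a bus with period 0 (ZeroDivisionError), and buses
-- whose congruence is unsolvable, where A's while-loop diverges.
def Pre_new_times (times : List (Int × Int)) : Prop :=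
  times ≠ [] ∧ ∀ i ∈ times.drop 1,
    i.1 ≠ 0 ∧ ((Int.gcd (times.headD (0, 0)).1 i.1 : Int) ∣ ((times.headD (0, 0)).2 - i.2))

instance (times : List (Int × Int)) : Decidable (Pre_new_times times) := by
  unfold Pre_new_times; infer_instance

def pvWitness_new_times : (List (Int × Int)) := [(2, 0), (3, 1), (5, 3)]

def Spec_new_times (times : List (Int × Int)) (out : List (Int × Int)) : Prop := out = new_times_alt times
instance (times : List (Int × Int)) (out : List (Int × Int)) : Decidable (Spec_new_times times out) := by unfold Spec_new_times; infer_instance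

-- ===== CLAIM (what is proved, stated in full; the proofs are below) =====
def Claim_equal_new_times : Prop := ∀ (times : List (Int × Int)), Dom_new_times times → Pre_new_times times → Spec_new_times times (new_times times)

-- ===== LEMMAS AND PROOFS =====
theorem egcdLoop_spec (a b : Int) (oldr r olds s : Int) :
    b ∣ oldr - olds * a → b ∣ r - s * a → Int.gcd oldr r = Int.gcd a b →
    (egcdLoop oldr r olds s).1 = (Int.gcd a b : Int) ∧
      b ∣ ((egcdLoop oldr r olds s).1 - (egcdLoop oldr r olds s).2 * a) := by
  induction oldr, r, olds, s using egcdLoop.induct with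
  | case1 oldr olds s hneg =>
    intro h1 h2 h3
    have hun : egcdLoop oldr 0 olds s = (-oldr, -olds) := by
      rw [egcdLoop]; simp [hneg]
    rw [Int.gcd_zero_right] at h3
    rw [hun]
    constructor
    · simp only []; rw [← h3]; omega
    · have heq : (-oldr : Int) - (-olds) * a = -(oldr - olds * a) := by ring
      simp only []; rw [heq]; exact dvd_neg.mpr h1
  | case2 oldr olds s hneg =>
    intro h1 h2 h3
    have hun : egcdLoop oldr 0 olds s = (oldr, olds) := by
      rw [egcdLoop]; simp [hneg]
    rw [Int.gcd_zero_right] at h3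
    rw [hun]
    constructor
    · simp only []; rw [← h3]; omega
    · exact h1
  | case3 oldr r olds s hr ih =>
    intro h1 h2 h3
    rw [egcdLoop]
    simp only [dif_neg hr]
    apply ih
    · exact h2
    · have heq : oldr - PySem.Int.floordiv oldr r * r - (olds - PySem.Int.floordiv oldr r * s) * a
          = (oldr - olds * a) - PySem.Int.floordiv oldr r * (r - s * a) := by ring
      rw [heq]
      exact dvd_sub h1 (Dvd.dvd.mul_left h2 _)
    · rw [← h3]
      have heq : oldr - PySem.Int.floordiv oldr r * r = oldr + (-(PySem.Int.floordiv oldr r)) * r := by ring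
      rw [heq, Int.gcd_add_mul_right_right, Int.gcd_comm]

theorem egcd_spec (a b : Int) :
    (egcd a b).1 = (Int.gcd a b : Int) ∧ b ∣ ((egcd a b).1 - (egcd a b).2 * a) := by
  exact egcdLoop_spec a b a b 1 0 (by simp) (by simp) rfl

-- solution-set characterisation of the congruence k*f0 ≡ a (mod i0)
theorem hit_iff (f0 i0 a x : Int) (h0 : i0 ≠ 0)
    (hd : (Int.gcd f0 i0 : Int) ∣ a)
    (hx : (i0.natAbs : Int) ∣ (f0 * x - (Int.gcd f0 i0 : Int))) (k : Int) :
    (i0 ∣ (k * f0 - a)) ↔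
      ((i0.natAbs : Int) / (Int.gcd f0 i0 : Int)) ∣ (k - x * (a / (Int.gcd f0 i0 : Int))) := by
  set g : Int := (Int.gcd f0 i0 : Int) with hg
  have hgpos : 0 < g := by
    have := Int.gcd_pos_of_ne_zero_right f0 h0
    rw [hg]; exact_mod_cast this
  obtain ⟨d, hdEq⟩ : g ∣ f0 := Int.gcd_dvd_left f0 i0
  obtain ⟨e, haEq⟩ : g ∣ a := hd
  obtain ⟨p, hmEq⟩ : g ∣ (i0.natAbs : Int) := by
    rw [Int.dvd_natAbs]
    exact Int.gcd_dvd_right f0 i0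
  have hpdiv : (i0.natAbs : Int) / g = p := by
    rw [hmEq]; exact Int.mul_ediv_cancel_left p (by omega)
  have hediv : a / g = e := by
    rw [haEq]; exact Int.mul_ediv_cancel_left e (by omega)
  have hdx : p ∣ (d * x - 1) := by
    have : (i0.natAbs : Int) ∣ g * (d * x - 1) := by
      have : f0 * x - g = g * (d * x - 1) := by rw [hdEq]; ring
      rw [← this]; exact hx
    rw [hmEq] at this
    exact (mul_dvd_mul_iff_left (by omega : g ≠ 0)).mp this
  rw [hpdiv, hediv]
  have hstep1 : i0 ∣ (k * f0 - a) ↔ (i0.natAbs : Int) ∣ (k * f0 - a) := (Int.natAbs_dvd).symm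
  have hstep2 : (i0.natAbs : Int) ∣ (k * f0 - a) ↔ p ∣ (k * d - e) := by
    rw [hmEq, hdEq, haEq]
    have : k * (g * d) - g * e = g * (k * d - e) := by ring
    rw [this]
    exact mul_dvd_mul_iff_left (by omega : g ≠ 0)
  rw [hstep1, hstep2]
  constructor
  · intro h
    have h1 : p ∣ (k * d - e) * x := Dvd.dvd.mul_right h x
    have h2 : p ∣ k * (d * x - 1) := Dvd.dvd.mul_left hdx k
    have : k - x * e = (k * d - e) * x - k * (d * x - 1) := by ring
    rw [this]
    exact dvd_sub h1 h2
  · intro h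
    have h1 : p ∣ (k - x * e) * d := Dvd.dvd.mul_right h d
    have h2 : p ∣ e * (d * x - 1) := Dvd.dvd.mul_left hdx e
    have : k * d - e = (k - x * e) * d + e * (d * x - 1) := by ring
    rw [this]
    exact dvd_add h1 h2

-- loop skipping lemma: t consecutive misses
theorem loopA_skip (f0 i0 i1 : Int) (t : Nat) : ∀ (fuel : Nat) (c : Int) (pair : List Int),
    pair.length < 2 →
    (∀ j : Nat, 1 ≤ j → j ≤ t → ¬ (PySem.Int.mod ((c + (j : Int) * f0) + i1) i0 = 0)) →
    loopA f0 i0 i1 (t + fuel) c pair = loopA f0 i0 i1 fuel (c + (t : Int) * f0) pair := by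
  induction t with
  | zero => intro fuel c pair _ _; simp
  | succ t ih =>
    intro fuel c pair hlen hmiss
    have hshape : t + 1 + fuel = (t + fuel) + 1 := by omega
    rw [hshape, loopA]
    simp only [if_pos hlen]
    have hm1 : ¬ (PySem.Int.mod ((c + f0) + i1) i0 = 0) := by
      have := hmiss 1 (by omega) (by omega)
      simpa using this
    rw [if_neg hm1]
    have := ih fuel (c + f0) pair hlen (by
      intro j hj1 hjt
      have := hmiss (j + 1) (by omega) (by omega)
      have harith : c + f0 + (j : Int) * f0 = c + ((j : Int) + 1) * f0 := by ring
      rw [harith]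
      push_cast at this ⊢
      exact this)
    rw [this]
    have : c + f0 + (t : Int) * f0 = c + ((t : Int) + 1) * f0 := by ring
    rw [this]
    push_cast
    ring_nf
theorem loopA_hit (f0 i0 i1 : Int) (fuel : Nat) (c : Int) (pair : List Int)
    (hlen : pair.length < 2) (hhit : PySem.Int.mod ((c + f0) + i1) i0 = 0) :
    loopA f0 i0 i1 (fuel + 1) c pair = loopA f0 i0 i1 fuel (c + f0) (pair ++ [c + f0]) := by
  rw [loopA]; simp [hlen, hhit]

theorem loopA_done (f0 i0 i1 : Int) (fuel : Nat) (c : Int) (pair : List Int)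
    (hlen : ¬ pair.length < 2) : loopA f0 i0 i1 fuel c pair = pair := by
  cases fuel with
  | zero => rw [loopA]
  | succ n => rw [loopA]; simp [hlen]

theorem loopA_result (f0 f1 i0 i1 k0 per : Int) (hper : 0 < per)
    (hk1 : 1 ≤ k0) (hk2 : k0 ≤ per)
    (hbound : k0 + per ≤ 2 * (i0.natAbs : Int) + 2)
    (hhit : ∀ k : Int, (PySem.Int.mod ((0 - f1 + k * f0) + i1) i0 = 0) ↔ per ∣ (k - k0)) :
    loopA f0 i0 i1 (2 * i0.natAbs + 2) (0 - f1) []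
      = [0 - f1 + k0 * f0, 0 - f1 + (k0 + per) * f0] := by
  have hnodvd : ∀ z : Int, 0 < z → z < per → ¬ per ∣ z := by
    intro z hz1 hz2 hdvd
    have := Int.le_of_dvd hz1 hdvd
    omega
  set K := k0.toNat with hK
  set P := per.toNat with hP
  have hKc : (K : Int) = k0 := by omega
  have hPc : (P : Int) = per := by omega
  obtain ⟨R, hR⟩ : ∃ R : Nat, 2 * i0.natAbs + 2 = (K - 1) + (1 + ((P - 1) + (1 + R))) := by
    refine ⟨2 * i0.natAbs + 2 - K - P, ?_⟩
    omega
  rw [hR]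
  -- phase 1: K-1 misses
  rw [loopA_skip f0 i0 i1 (K - 1) _ (0 - f1) [] (by simp) ?miss1]
  case miss1 =>
    intro j hj1 hj2 hcond
    have := (hhit (j : Int)).mp hcond
    have hj2' : (j : Int) ≤ k0 - 1 := by omega
    have : per ∣ (k0 - (j : Int)) := by
      have := dvd_neg.mpr this
      simpa using this
    exact hnodvd _ (by omega) (by omega) this
  -- phase 2: hit at k0
  have hc1 : (0 - f1 + ((K - 1 : Nat) : Int) * f0) + f0 = 0 - f1 + k0 * f0 := by
    have : ((K - 1 : Nat) : Int) = k0 - 1 := by omega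
    rw [this]; ring
  rw [show (1 + ((P - 1) + (1 + R))) = ((P - 1) + (1 + R)) + 1 by omega]
  rw [loopA_hit _ _ _ _ _ _ (by simp) (by rw [hc1]; exact (hhit k0).mpr (by simp))]
  rw [hc1]
  -- phase 3: P-1 misses
  rw [loopA_skip f0 i0 i1 (P - 1) _ _ _ (by simp) ?miss2]
  case miss2 =>
    intro j hj1 hj2 hcond
    have harith : (0 - f1 + k0 * f0) + (j : Int) * f0 = 0 - f1 + (k0 + (j : Int)) * f0 := by ring
    rw [harith] at hcond
    have := (hhit (k0 + (j : Int))).mp hcond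
    have hsimp : k0 + (j : Int) - k0 = (j : Int) := by ring
    rw [hsimp] at this
    exact hnodvd _ (by omega) (by omega) this
  -- phase 4: hit at k0 + per
  have hc2 : ((0 - f1 + k0 * f0) + ((P - 1 : Nat) : Int) * f0) + f0 = 0 - f1 + (k0 + per) * f0 := by
    have : ((P - 1 : Nat) : Int) = per - 1 := by omega
    rw [this]; ring
  rw [show (1 + R) = R + 1 by omega]
  rw [loopA_hit _ _ _ _ _ _ (by simp) (by
    rw [hc2]
    exact (hhit (k0 + per)).mpr (by simp))]
  rw [hc2]
  -- phase 5: done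
  rw [loopA_done _ _ _ _ _ _ (by simp)]
  simp

theorem aElem_eq_bElem (f0 f1 i0 i1 : Int) (h0 : i0 ≠ 0)
    (hd : (Int.gcd f0 i0 : Int) ∣ (f1 - i1)) :
    aElem f0 f1 i0 i1 = bElem f0 f1 i0 i1 := by
  have hm : (if i0 > 0 then i0 else -i0) = (i0.natAbs : Int) := by
    split_ifs <;> omega
  set g : Int := (Int.gcd f0 i0 : Int) with hg
  have hgpos : 0 < g := by
    have := Int.gcd_pos_of_ne_zero_right f0 h0
    rw [hg]; exact_mod_cast this
  have hgcdm : Int.gcd f0 ((i0.natAbs : Int)) = Int.gcd f0 i0 := by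
    simp [Int.gcd, Int.natAbs_abs]
  have hes := egcd_spec f0 ((i0.natAbs : Int))
  set x : Int := (egcd f0 ((i0.natAbs : Int))).2 with hxdef
  have hg1 : (egcd f0 ((i0.natAbs : Int))).1 = g := by rw [hes.1, hgcdm]
  have hxd : (i0.natAbs : Int) ∣ f0 * x - g := by
    have h2 := hes.2
    rw [hg1] at h2
    have heq : f0 * x - g = -(g - x * f0) := by ring
    rw [heq]
    exact dvd_neg.mpr h2
  obtain ⟨p, hpEq⟩ : g ∣ (i0.natAbs : Int) := by
    rw [hg, Int.dvd_natAbs]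
    exact Int.gcd_dvd_right f0 i0
  have hmpos : 0 < (i0.natAbs : Int) := by omega
  have hppos : 0 < p := by nlinarith
  have hperp : (i0.natAbs : Int) / g = p := by
    rw [hpEq]; exact Int.mul_ediv_cancel_left p (by omega)
  have hperf : PySem.Int.floordiv ((i0.natAbs : Int)) g = p := by
    rw [PySem.Int.floordiv_eq_ediv_of_pos hgpos, hperp]
  have hfloorA : PySem.Int.floordiv (f1 - i1) g = (f1 - i1) / g :=
    PySem.Int.floordiv_eq_ediv_of_pos hgpos
  set r0 : Int := x * PySem.Int.floordiv (f1 - i1) g with hr0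
  set k0 : Int := PySem.Int.mod (r0 - 1) p + 1 with hk0
  have hmod1 : 0 ≤ PySem.Int.mod (r0 - 1) p := PySem.Int.mod_nonneg _ hppos
  have hmod2 : PySem.Int.mod (r0 - 1) p < p := PySem.Int.mod_lt _ hppos
  have hk0r0 : p ∣ (k0 - r0) := by
    have hq := PySem.Int.floordiv_mul_add_mod (r0 - 1) p
    have h1 : p ∣ (PySem.Int.floordiv (r0 - 1) p * p) := dvd_mul_left _ _
    have h2 : k0 - r0 = -(PySem.Int.floordiv (r0 - 1) p * p) := by omega
    rw [h2]
    exact dvd_neg.mpr h1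
  have hhit : ∀ k : Int, (PySem.Int.mod ((0 - f1 + k * f0) + i1) i0 = 0) ↔ p ∣ (k - k0) := by
    intro k
    rw [PySem.Int.mod_eq_zero_iff_dvd]
    have harith : (0 - f1 + k * f0) + i1 = k * f0 - (f1 - i1) := by ring
    rw [harith]
    rw [hit_iff f0 i0 (f1 - i1) x h0 (by rw [← hg]; exact hd) hxd k]
    rw [← hg, hperp, ← hfloorA, ← hr0]
    constructor
    · intro h
      have : k - k0 = (k - r0) - (k0 - r0) := by ring
      rw [this]
      exact dvd_sub h hk0r0
    · intro h
      have : k - r0 = (k - k0) + (k0 - r0) := by ring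
      rw [this]
      exact dvd_add h hk0r0
  have hbound : k0 + p ≤ 2 * (i0.natAbs : Int) + 2 := by nlinarith
  have hloop := loopA_result f0 f1 i0 i1 k0 p hppos (by omega) (by omega) hbound hhit
  unfold aElem
  rw [hloop]
  simp only [bElem, hm, hg1, hperf]
  show ((0 - f1 + (k0 + p) * f0) - (0 - f1 + k0 * f0), 0 - f1 + k0 * f0)
      = (p * f0, k0 * f0 - f1)
  simp only [Prod.mk.injEq]
  constructor <;> ring

-- ===== VERDICT (by name: the statement is the Claim_ definition above) =====
theorem new_times_spec : Claim_equal_new_times := by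
  intro times _hdom hpre
  unfold Spec_new_times
  cases times with
  | nil => exact absurd rfl hpre.1
  | cons f rest =>
    have hall := hpre.2
    simp only [List.drop_succ_cons, List.drop_zero, List.headD_cons] at hall
    simp only [new_times, new_times_alt]
    apply PySem.List.foldl_congr_mem
    intro acc i hi
    obtain ⟨h1, h2⟩ := hall i hi
    rw [aElem_eq_bElem f.1 f.2 i.1 i.2 h1 h2]
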